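-- pv_equiv track=rewrite | github.com/missaouimedamine/backend-healthcare | app/utils/infos_process.py | fix_multiline_strings
-- ===== SOURCE A (Python) =====
-- def fix_multiline_strings(s):
--         lines = s.split('\n')
--         new_lines = []
--         buffer = ""
--         in_string = False
--
--         for line in lines:
--             line = line.rstrip()
--             quote_count = line.count('"')
--             if not in_string:
--                 buffer = line
--                 if quote_count % 2 == 1:  # Odd number of quotes -> string not closed
--                     in_string = True
--                 else:
--                     new_lines.append(buffer)
--             else:
--                 buffer += ' ' + line
--                 if quote_count % 2 == 1:
--                     new_lines.append(buffer)
--                     in_string = False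
--
--         if in_string:
--             new_lines.append(buffer)  # Last incomplete line
--         return "\n".join(new_lines)
-- ===== SOURCE B (Python) =====
-- def fix_multiline_strings(s):
--     lines = [l.rstrip() for l in s.split('\n')]
--     groups = []
--     while lines:
--         q = lines[0].count('"')
--         k = 1
--         while q % 2 == 1 and k < len(lines):
--             q += lines[k].count('"')
--             k += 1
--         groups.append(' '.join(lines[:k]))
--         lines = lines[k:]
--     return '\n'.join(groups)
-- ===== Notes on version B (the rewrite author's own statement) =====
-- stated objective: simpler
-- what changed: Replaces A's single-pass state machine (in_string flag plus an incrementally-grown string buffer) with a slice-based grouping: strip all lines in one comprehension pass, then repeatedly scan ahead under a running quote count to find the group-end index k, emit the space-joined slice lines[:k] and continue on lines[k:].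
import Mathlib
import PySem

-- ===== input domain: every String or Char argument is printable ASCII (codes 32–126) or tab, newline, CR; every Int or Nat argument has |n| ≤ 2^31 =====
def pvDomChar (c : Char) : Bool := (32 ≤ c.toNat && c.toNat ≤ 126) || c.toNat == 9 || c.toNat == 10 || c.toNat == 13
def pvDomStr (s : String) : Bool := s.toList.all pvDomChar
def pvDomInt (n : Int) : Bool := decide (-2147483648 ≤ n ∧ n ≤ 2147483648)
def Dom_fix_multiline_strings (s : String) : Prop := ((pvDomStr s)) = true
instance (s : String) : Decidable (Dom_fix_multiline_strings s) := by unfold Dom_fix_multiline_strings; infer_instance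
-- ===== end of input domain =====

-- B replaces A's single-pass in_string state machine (flag + incremental string
-- buffer) by a slice-based grouping: strip all lines first, then repeatedly
-- scan ahead for the group-ending index k and slice the line list; objective: simpler.

-- ===== PORT A =====
-- state: (new_lines, buffer, in_string), exactly A's loop over the split lines
def fixA_go : List (List Char) → List (List Char) → List Char → Bool → List (List Char)
  | [], new_lines, buffer, in_string =>
      if in_string then new_lines ++ [buffer] else new_lines
  | line :: rest, new_lines, buffer, in_string =>
      let line := PySem.Chars.rstrip line
      let quote_count := PySem.Chars.count line ['"']
      if !in_string then
        let buffer := line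
        if quote_count % 2 == 1 then fixA_go rest new_lines buffer true
        else fixA_go rest (new_lines ++ [buffer]) buffer false
      else
        let buffer := buffer ++ [' '] ++ line
        if quote_count % 2 == 1 then fixA_go rest (new_lines ++ [buffer]) buffer false
        else fixA_go rest new_lines buffer true

def fix_multiline_strings (s : String) : String :=
  String.ofList (PySem.Chars.join ['\n']
    (fixA_go (PySem.Chars.splitOn s.toList ['\n']) [] [] false))

-- ===== PORT B =====
-- inner while loop: number of further lines consumed after the first one,
-- scanning while the running quote count q is odd
def findK (q : Nat) : List (List Char) → Nat
  | [] => 0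
  | l :: rs =>
      if q % 2 == 1 then 1 + findK (q + PySem.Chars.count l ['"']) rs
      else 0

theorem findK_le (q : Nat) (rs : List (List Char)) : findK q rs ≤ rs.length := by
  induction rs generalizing q with
  | nil => simp [findK]
  | cons l rs ih =>
    simp only [findK, List.length_cons]
    split
    · have := ih (q + PySem.Chars.count l ['"'])
      omega
    · exact Nat.zero_le _

-- outer while loop over the (already stripped) line list: slice off one group
def mergeB : List (List Char) → List (List Char)
  | [] => []
  | l :: rest =>
      PySem.Chars.join [' ']
          (List.take (1 + findK (PySem.Chars.count l ['"']) rest) (l :: rest))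
        :: mergeB (List.drop (1 + findK (PySem.Chars.count l ['"']) rest) (l :: rest))
  termination_by l => l.length
  decreasing_by
    have := findK_le (PySem.Chars.count l ['"']) rest
    simp only [List.length_drop, List.length_cons]
    omega

def fix_multiline_strings_alt (s : String) : String :=
  String.ofList (PySem.Chars.join ['\n']
    (mergeB ((PySem.Chars.splitOn s.toList ['\n']).map PySem.Chars.rstrip)))

-- ===== PRECONDITION & SPEC =====
def Spec_fix_multiline_strings (s : String) (out : String) : Prop := out = fix_multiline_strings_alt s
instance (s : String) (out : String) : Decidable (Spec_fix_multiline_strings s out) := by unfold Spec_fix_multiline_strings; infer_instance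

-- ===== CLAIM (what is proved, stated in full; the proofs are below) =====
def Claim_equal_fix_multiline_strings : Prop := ∀ (s : String), Dom_fix_multiline_strings s → Spec_fix_multiline_strings s (fix_multiline_strings s)

-- ===== LEMMAS AND PROOFS =====

theorem mergeB_nil : mergeB [] = [] := by
  conv_lhs => unfold mergeB

theorem mergeB_cons (l : List Char) (rest : List (List Char)) :
    mergeB (l :: rest) =
      PySem.Chars.join [' ']
          (List.take (1 + findK (PySem.Chars.count l ['"']) rest) (l :: rest))
        :: mergeB (List.drop (1 + findK (PySem.Chars.count l ['"']) rest) (l :: rest)) := by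
  conv_lhs => unfold mergeB

theorem fixA_false (l : List Char) (rest nl : List (List Char)) (buf : List Char) :
    fixA_go (l :: rest) nl buf false =
      if PySem.Chars.count (PySem.Chars.rstrip l) ['"'] % 2 == 1 then
        fixA_go rest nl (PySem.Chars.rstrip l) true
      else fixA_go rest (nl ++ [PySem.Chars.rstrip l]) (PySem.Chars.rstrip l) false := by
  simp [fixA_go]

theorem fixA_true (l : List Char) (rest nl : List (List Char)) (buf : List Char) :
    fixA_go (l :: rest) nl buf true =
      if PySem.Chars.count (PySem.Chars.rstrip l) ['"'] % 2 == 1 then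
        fixA_go rest (nl ++ [buf ++ [' '] ++ PySem.Chars.rstrip l])
          (buf ++ [' '] ++ PySem.Chars.rstrip l) false
      else fixA_go rest nl (buf ++ [' '] ++ PySem.Chars.rstrip l) true := by
  simp [fixA_go]

-- A's buffer after absorbing the lines of g: buffer += ' ' + line for each line
def appB (buf : List Char) (g : List (List Char)) : List Char :=
  g.foldl (fun b l => b ++ [' '] ++ l) buf

theorem join_head (sep x y : List Char) (g : List (List Char)) :
    PySem.Chars.join sep ((x ++ sep ++ y) :: g) = x ++ sep ++ PySem.Chars.join sep (y :: g) := by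
  cases g with
  | nil => simp [PySem.Chars.join_singleton]
  | cons w g' => simp [PySem.Chars.join_cons_cons, List.append_assoc]

theorem appB_eq_join (g : List (List Char)) (x : List Char) :
    appB x g = PySem.Chars.join [' '] (x :: g) := by
  induction g generalizing x with
  | nil => simp [appB, PySem.Chars.join_singleton]
  | cons y g' ih =>
    show appB (x ++ [' '] ++ y) g' = _
    rw [ih, join_head, PySem.Chars.join_cons_cons]

theorem findK_even (q : Nat) (rs : List (List Char)) (h : q % 2 = 0) :
    findK q rs = 0 := by
  cases rs with
  | nil => rfl
  | cons a b => simp [findK, h]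

theorem go_eq (n : Nat) : ∀ (lines : List (List Char)), lines.length ≤ n →
    (∀ nl buf, fixA_go lines nl buf false =
        nl ++ mergeB (lines.map PySem.Chars.rstrip)) ∧
    (∀ nl buf q, q % 2 = 1 →
        fixA_go lines nl buf true =
          nl ++ [appB buf ((lines.map PySem.Chars.rstrip).take
                    (findK q (lines.map PySem.Chars.rstrip)))]
             ++ mergeB ((lines.map PySem.Chars.rstrip).drop
                    (findK q (lines.map PySem.Chars.rstrip)))) := by
  induction n with
  | zero =>
    intro lines hlen
    have : lines = [] := List.eq_nil_of_length_eq_zero (Nat.le_zero.mp hlen)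
    subst this
    exact ⟨fun nl buf => by simp [fixA_go, mergeB_nil],
           fun nl buf q hq => by simp [fixA_go, findK, appB, mergeB_nil]⟩
  | succ n ih =>
    intro lines hlen
    cases lines with
    | nil =>
      exact ⟨fun nl buf => by simp [fixA_go, mergeB_nil],
             fun nl buf q hq => by simp [fixA_go, findK, appB, mergeB_nil]⟩
    | cons l rest =>
      have hrest : rest.length ≤ n := by simpa using hlen
      constructor
      · intro nl buf
        rw [fixA_false _ _ _ buf]
        by_cases hq : PySem.Chars.count (PySem.Chars.rstrip l) ['"'] % 2 = 1
        · rw [if_pos (by simp [hq]), (ih rest hrest).2 nl (PySem.Chars.rstrip l) _ hq]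
          rw [List.map_cons, mergeB_cons, Nat.add_comm 1 _,
            List.take_succ_cons, List.drop_succ_cons, appB_eq_join]
          simp
        · rw [if_neg (by simp [hq]),
            (ih rest hrest).1 (nl ++ [PySem.Chars.rstrip l]) (PySem.Chars.rstrip l)]
          rw [List.map_cons, mergeB_cons, findK_even _ _ (by omega)]
          simp [PySem.Chars.join_singleton]
      · intro nl buf q hq
        rw [fixA_true _ _ _ buf, List.map_cons]
        have hstep : findK q (PySem.Chars.rstrip l :: rest.map PySem.Chars.rstrip)
            = 1 + findK (q + PySem.Chars.count (PySem.Chars.rstrip l) ['"'])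
                (rest.map PySem.Chars.rstrip) := by
          simp [findK, hq]
        by_cases hcq : PySem.Chars.count (PySem.Chars.rstrip l) ['"'] % 2 = 1
        · have hf0 : findK (q + PySem.Chars.count (PySem.Chars.rstrip l) ['"'])
              (rest.map PySem.Chars.rstrip) = 0 := findK_even _ _ (by omega)
          rw [if_pos (by simp [hcq]),
            (ih rest hrest).1 (nl ++ [buf ++ [' '] ++ PySem.Chars.rstrip l])
              (buf ++ [' '] ++ PySem.Chars.rstrip l)]
          rw [hstep, hf0, Nat.add_comm 1 0, List.take_succ_cons, List.drop_succ_cons]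
          simp [appB]
        · have hqc : (q + PySem.Chars.count (PySem.Chars.rstrip l) ['"']) % 2 = 1 := by omega
          rw [if_neg (by simp [hcq]),
            (ih rest hrest).2 nl (buf ++ [' '] ++ PySem.Chars.rstrip l) _ hqc]
          rw [hstep, Nat.add_comm 1 _, List.take_succ_cons, List.drop_succ_cons]
          rfl

-- ===== VERDICT (by name: the statement is the Claim_ definition above) =====
theorem fix_multiline_strings_spec : Claim_equal_fix_multiline_strings := by
  intro s _
  unfold Spec_fix_multiline_strings fix_multiline_strings fix_multiline_strings_alt
  rw [(go_eq (PySem.Chars.splitOn s.toList ['\n']).length _ le_rfl).1]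
  rfl
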